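-- pv_equiv track=rewrite | github.com/Dylkln/Projet_AIOI | aioi/test_stats.py | count_structure
-- ===== SOURCE A (Python) =====
-- def count_structure(data_train):
-- 	"""
--
-- 	"""
-- 	structs = [".", "(", ")"]
--
-- 	struct_index_dict = {}
-- 	structures = []
--
-- 	for struct in data_train["structure"]:
-- 		structures.append(struct)
--
-- 	for structure in structures:
-- 		for i, struct in enumerate(structure):
-- 			pos = i + 1
--
-- 			if pos not in struct_index_dict.keys():
-- 				struct_index_dict[pos] = {}
--
-- 			if struct not in struct_index_dict[pos].keys():
-- 				struct_index_dict[pos][struct] = 0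
-- 			struct_index_dict[pos][struct] += 1
--
--
-- 	for s in structs:
-- 		for pos in struct_index_dict.keys():
-- 			if s not in struct_index_dict[pos]:
-- 				struct_index_dict[pos][s] = 0
--
--
-- 	return struct_index_dict
-- ===== SOURCE B (Python) =====
-- def count_structure(data_train):
--     """Column-extraction re-implementation: no incremental counter dict at all.
--     For each position, extract the column of characters, dedup it in first-occurrence
--     order (dict.fromkeys) with the '.', '(', ')' defaults appended, and pair each
--     distinct char with its list.count in the column."""
--     structures = list(data_train["structure"])
--     maxlen = max(map(len, structures), default=0)
--     result = {}
--     for i in range(maxlen):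
--         col = [s[i] for s in structures if len(s) > i]
--         keys = dict.fromkeys(col + [".", "(", ")"])
--         result[i + 1] = {c: col.count(c) for c in keys}
--     return result
-- ===== Notes on version B (the rewrite author's own statement) =====
-- stated objective: alternative
-- what changed: A grows a nested position->char->count dict incrementally while scanning the strings row-by-row and then back-fills '.', '(', ')' with a second double loop; B keeps no counter at all: for each position it extracts the column of characters as a list, dedups it in first-occurrence order with the three defaults appended (dict.fromkeys), and pairs each distinct char with its list.count in the column.
import Mathlib
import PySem

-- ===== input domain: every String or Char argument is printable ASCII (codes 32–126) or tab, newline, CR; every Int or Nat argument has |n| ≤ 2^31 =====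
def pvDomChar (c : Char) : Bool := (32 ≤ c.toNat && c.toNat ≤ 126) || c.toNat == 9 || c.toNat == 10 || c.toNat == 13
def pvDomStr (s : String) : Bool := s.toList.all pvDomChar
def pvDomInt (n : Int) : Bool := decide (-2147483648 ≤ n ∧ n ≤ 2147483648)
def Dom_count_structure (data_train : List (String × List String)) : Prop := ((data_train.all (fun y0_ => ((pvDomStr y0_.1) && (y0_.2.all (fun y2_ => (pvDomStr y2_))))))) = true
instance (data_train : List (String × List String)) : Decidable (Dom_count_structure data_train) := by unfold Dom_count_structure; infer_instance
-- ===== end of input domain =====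

-- B replaces A's incremental nested tally dict with per-column extraction: dedup the column (plus defaults) and pair each distinct char with its count; same result, alternative algorithm.

-- shared helper: a one-character Python string
def pvChr (c : Char) : String := String.ofList [c]

-- ===== PORT A =====
def count_structure (data_train : List (String × List String)) : List (Int × List (String × Int)) :=
  match (PySem.Dict.mk data_train).get? "structure" with
  | none => []  -- data_train["structure"] raises KeyError; excluded by Pre_
  | some strs =>
    let structures := strs.foldl (fun acc s => acc ++ [s]) []
    let d0 : PySem.Dict Int (PySem.Dict String Int) :=
      structures.foldl (fun d st =>
        (PySem.List.enumerate st.toList).foldl (fun d ic =>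
          let pos : Int := ic.1 + 1
          let d := if d.contains pos then d else d.insert pos PySem.Dict.empty
          let inner := d.getD pos PySem.Dict.empty
          let inner := if inner.contains (pvChr ic.2) then inner else inner.insert (pvChr ic.2) 0
          d.insert pos (inner.insert (pvChr ic.2) (inner.getD (pvChr ic.2) 0 + 1))) d) PySem.Dict.empty
    -- fill loop: iterating the keys view is exact as a snapshot here, since the loop never adds outer keys
    let d1 := [".", "(", ")"].foldl (fun d s =>
      d.keys.foldl (fun d pos =>
        if (d.getD pos PySem.Dict.empty).contains s then d
        else d.insert pos ((d.getD pos PySem.Dict.empty).insert s 0)) d) d0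
    d1.items.map (fun p => (p.1, p.2.items))

-- ===== PORT B =====
def count_structure_alt (data_train : List (String × List String)) : List (Int × List (String × Int)) :=
  match (PySem.Dict.mk data_train).get? "structure" with
  | none => []  -- data_train["structure"] raises KeyError; excluded by Pre_
  | some structures =>
    let maxlen : Int := PySem.List.maxD (structures.map (fun s => (PySem.Str.len s : Int))) id 0
    let result : PySem.Dict Int (PySem.Dict String Int) :=
      (PySem.List.pyRange 0 maxlen 1).foldl (fun r i =>
        -- col = [s[i] for s in structures if len(s) > i]
        let col := (structures.filter (fun s => i < (PySem.Str.len s : Int))).map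
            (fun s => pvChr (PySem.List.pyGetD s.toList i ' '))  -- s[i]; in range under the filter
        -- keys = dict.fromkeys(col + [".", "(", ")"])   (ordered dedup)
        let keys := PySem.List.dedup (col ++ [".", "(", ")"])
        -- {c: col.count(c) for c in keys}: keys are distinct, so the dict IS this association list
        r.insert (i + 1) (PySem.Dict.mk (keys.map (fun c => (c, (PySem.List.count col c : Int)))))
      ) PySem.Dict.empty
    result.items.map (fun p => (p.1, p.2.items))

-- ===== PRECONDITION & SPEC =====
-- Pre_ excludes exactly the inputs with no "structure" key, on which Python A raises KeyError.
def Pre_count_structure (data_train : List (String × List String)) : Prop :=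
  "structure" ∈ data_train.map Prod.fst
instance (data_train : List (String × List String)) : Decidable (Pre_count_structure data_train) := by unfold Pre_count_structure; infer_instance

def pvWitness_count_structure : (List (String × List String)) := [("structure", [".((", ")."])]

def Spec_count_structure (data_train : List (String × List String)) (out : List (Int × List (String × Int))) : Prop := out = count_structure_alt data_train
instance (data_train : List (String × List String)) (out : List (Int × List (String × Int))) : Decidable (Spec_count_structure data_train out) := by unfold Spec_count_structure; infer_instance

-- ===== CLAIM (what is proved, stated in full; the proofs are below) =====
def Claim_equal_count_structure : Prop := ∀ (data_train : List (String × List String)), Dom_count_structure data_train → Pre_count_structure data_train → Spec_count_structure data_train (count_structure data_train)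

-- ===== LEMMAS AND PROOFS =====

-- loop-body abbreviation used by the proofs
def pvG (ic : Int × Char) (inner : PySem.Dict String Int) : PySem.Dict String Int :=
  inner.insert (pvChr ic.2) (inner.getD (pvChr ic.2) 0 + 1)

def pvPosL (n : Nat) : List Int := (List.range n).map (fun j : Nat => (j : Int) + 1)

def pvM (structures : List String) : Nat := structures.foldl (fun m s => max m s.toList.length) 0

def pvCol (structures : List String) (i : Nat) : PySem.Dict String Int :=
  structures.foldl (fun d s =>
    if i < s.toList.length then pvG ((i : Int), s.toList.getD i ' ') d else d) PySem.Dict.empty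

def pvColList (structures : List String) (i : Nat) : List String :=
  (structures.filter (fun s => i < s.toList.length)).map (fun s => pvChr (s.toList.getD i ' '))

def pvFill (d : PySem.Dict String Int) : PySem.Dict String Int :=
  ((d.setdefault "." 0).setdefault "(" 0).setdefault ")" 0

-- A's inner-loop body in one-insert form
theorem pv_stepA (d : PySem.Dict Int (PySem.Dict String Int)) (ic : Int × Char) :
    (let pos : Int := ic.1 + 1
     let d' := if d.contains pos then d else d.insert pos PySem.Dict.empty
     let inner := d'.getD pos PySem.Dict.empty
     let inner' := if inner.contains (pvChr ic.2) then inner else inner.insert (pvChr ic.2) 0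
     d'.insert pos (inner'.insert (pvChr ic.2) (inner'.getD (pvChr ic.2) 0 + 1)))
    = d.insert (ic.1 + 1) (pvG ic (d.getD (ic.1 + 1) PySem.Dict.empty)) := by
  simp only [pvG]
  by_cases hp : d.contains (ic.1 + 1)
  · simp only [hp, if_true]
    by_cases hc : (d.getD (ic.1 + 1) PySem.Dict.empty).contains (pvChr ic.2)
    · simp [hc]
    · simp [hc, PySem.Dict.getD_insert_self, PySem.Dict.insert_insert_self,
        PySem.Dict.getD_of_not_contains _ _ (by simpa using hc)]
  · simp only [hp, Bool.false_eq_true, if_false]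
    have h0 : d.getD (ic.1 + 1) PySem.Dict.empty = PySem.Dict.empty :=
      PySem.Dict.getD_of_not_contains _ _ (by simpa using hp)
    simp [PySem.Dict.getD_insert_self, PySem.Dict.insert_insert_self, h0,
      PySem.Dict.contains_empty, PySem.Dict.getD_empty]

-- projection of a keyed insert-fold at one key
theorem pv_proj {β κ ν : Type} [BEq κ] [LawfulBEq κ] (l : List β) (k : β → κ) (g : β → ν → ν)
    (v0 : ν) : ∀ (d : PySem.Dict κ ν) (p : κ),
    (l.foldl (fun d x => d.insert (k x) (g x (d.getD (k x) v0))) d).getD p v0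
      = (l.filter (fun x => k x == p)).foldl (fun a x => g x a) (d.getD p v0) := by
  induction l with
  | nil => intro d p; rfl
  | cons x t ih =>
    intro d p
    by_cases hk : k x = p
    · subst hk
      simp only [List.foldl_cons, List.filter_cons, beq_self_eq_true, if_true, ih,
        PySem.Dict.getD_insert_self]
    · have hb : (k x == p) = false := by simpa using fun h : k x = p => hk h
      simp only [List.foldl_cons, List.filter_cons, hb, Bool.false_eq_true, if_false, ih]
      rw [PySem.Dict.getD_insert_of_ne _ _ _ (fun h : p = k x => hk h.symm)]

-- enumerate: first components
theorem pv_enum_map (xs : List Char) : ∀ (s : Int),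
    (PySem.List.enumerate xs s).map (fun ic => ic.1 + 1)
      = (List.range xs.length).map (fun j : Nat => s + (j : Int) + 1) := by
  induction xs with
  | nil => intro s; rfl
  | cons x t ih =>
    intro s
    rw [PySem.List.enumerate_cons]
    simp only [List.map_cons, List.length_cons, List.range_succ_eq_map, ih, List.map_map]
    congr 1
    · push_cast; ring
    · apply List.map_congr_left
      intro j _
      simp only [Function.comp]
      push_cast; ring

theorem pv_enum_lb (xs : List Char) : ∀ (s : Int), ∀ ic ∈ PySem.List.enumerate xs s, s ≤ ic.1 := by
  induction xs with
  | nil => intro s ic h; simp [PySem.List.enumerate] at h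
  | cons x t ih =>
    intro s ic h
    rw [PySem.List.enumerate_cons] at h
    rcases List.mem_cons.1 h with h | h
    · simp [h]
    · have := ih (s + 1) ic h; omega

theorem pv_enum_filter (xs : List Char) : ∀ (j : Nat) (s : Int),
    (PySem.List.enumerate xs s).filter (fun ic => ic.1 + 1 == s + (j : Int) + 1)
      = if h : j < xs.length then [(s + (j : Int), xs[j])] else [] := by
  induction xs with
  | nil => intro j s; simp [PySem.List.enumerate]
  | cons x t ih =>
    intro j s
    rw [PySem.List.enumerate_cons, List.filter_cons]
    match j with
    | 0 =>
      have hhead : ((s : Int) + 1 == s + ((0 : Nat) : Int) + 1) = true := by simp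
      rw [hhead]
      simp only [if_true]
      have htail : (PySem.List.enumerate t (s + 1)).filter
          (fun ic => ic.1 + 1 == s + ((0 : Nat) : Int) + 1) = [] := by
        apply List.filter_eq_nil_iff.2
        intro ic hm
        have := pv_enum_lb t (s + 1) ic hm
        simp only [beq_iff_eq]
        intro h; omega
      rw [htail]
      simp
    | (j' + 1) =>
      have hhead : ((s : Int) + 1 == s + ((j' + 1 : Nat) : Int) + 1) = false := by
        simp only [beq_eq_false_iff_ne, ne_eq]
        push_cast; omega
      rw [hhead]
      simp only [Bool.false_eq_true, if_false]
      have harg : ∀ ic : Int × Char, (ic.1 + 1 == s + ((j' + 1 : Nat) : Int) + 1)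
          = (ic.1 + 1 == (s + 1) + ((j' : Nat) : Int) + 1) := by
        intro ic; congr 1; push_cast; ring
      rw [List.filter_congr (fun ic _ => harg ic), ih j' (s + 1)]
      rcases Nat.lt_or_ge j' t.length with h | h
      · rw [dif_pos h, dif_pos (by simpa using Nat.succ_lt_succ h)]
        have h1 : (s + 1) + (j' : Int) = s + ((j' + 1 : Nat) : Int) := by push_cast; ring
        simp [h1]
      · rw [dif_neg (by omega), dif_neg (by simp; omega)]

theorem pv_posL_mem (n : Nat) (v : Int) : v ∈ pvPosL n ↔ 1 ≤ v ∧ v ≤ (n : Int) := by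
  simp only [pvPosL, List.mem_map, List.mem_range]
  constructor
  · rintro ⟨j, hj, rfl⟩; omega
  · rintro ⟨h1, h2⟩; exact ⟨(v - 1).toNat, by omega, by omega⟩

theorem pv_posL_nodup (n : Nat) : (pvPosL n).Nodup := by
  refine List.Nodup.map ?_ List.nodup_range
  intro a b h
  have h' : (a : Int) + 1 = (b : Int) + 1 := h
  omega

theorem pv_posL_succ (n : Nat) : pvPosL (n + 1) = pvPosL n ++ [(n : Int) + 1] := by
  simp [pvPosL, List.range_succ]

theorem pv_update_posL (n : Nat) : ∀ (m : Nat),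
    PySem.Set.update (pvPosL m) (pvPosL n) = pvPosL (max m n) := by
  induction n with
  | zero => intro m; simp [pvPosL, PySem.Set.update]
  | succ n ih =>
    intro m
    rw [pv_posL_succ, PySem.Set.update, List.foldl_append]
    have h1 : List.foldl PySem.Set.add (pvPosL m) (pvPosL n) = pvPosL (max m n) := ih m
    rw [h1]
    simp only [List.foldl_cons, List.foldl_nil]
    by_cases h : (n : Int) + 1 ∈ pvPosL (max m n)
    · have hc : PySem.Set.contains (pvPosL (max m n)) ((n : Int) + 1) = true := by
        simpa [PySem.Set.contains, List.contains_eq_mem] using h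
      rw [PySem.Set.add, if_pos hc]
      have hb := (pv_posL_mem (max m n) ((n : Int) + 1)).1 h
      have : max m (n + 1) = max m n := by omega
      rw [this]
    · have hc : PySem.Set.contains (pvPosL (max m n)) ((n : Int) + 1) = false := by
        simpa [PySem.Set.contains, List.contains_eq_mem] using h
      rw [PySem.Set.add, hc]
      simp only [Bool.false_eq_true, if_false]
      have hmn : max m n = n := by
        by_contra hne
        exact h ((pv_posL_mem _ _).2 ⟨by omega, by omega⟩)
      have : max m (n + 1) = n + 1 := by omega
      rw [hmn, this, pv_posL_succ]

theorem pv_keys_fold (structures : List String) : ∀ (m : Nat),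
    structures.foldl (fun acc s => PySem.Set.update acc (pvPosL s.toList.length)) (pvPosL m)
      = pvPosL (structures.foldl (fun m s => max m s.toList.length) m) := by
  induction structures with
  | nil => intro m; rfl
  | cons s t ih =>
    intro m
    simp only [List.foldl_cons]
    rw [pv_update_posL, ih]

-- one fill pass over the key list
theorem pv_pass (s : String) : ∀ (K : List Int) (d : PySem.Dict Int (PySem.Dict String Int)),
    K.Nodup → (∀ p ∈ K, p ∈ d.keys) →
    (K.foldl (fun d pos =>
        if (d.getD pos PySem.Dict.empty).contains s then d
        else d.insert pos ((d.getD pos PySem.Dict.empty).insert s 0)) d).keys = d.keys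
    ∧ ∀ p, (K.foldl (fun d pos =>
        if (d.getD pos PySem.Dict.empty).contains s then d
        else d.insert pos ((d.getD pos PySem.Dict.empty).insert s 0)) d).getD p PySem.Dict.empty
        = if p ∈ K then (d.getD p PySem.Dict.empty).setdefault s 0
          else d.getD p PySem.Dict.empty := by
  intro K
  induction K with
  | nil => intro d _ _; exact ⟨rfl, by simp⟩
  | cons k K' ih =>
    intro d hnd hmem
    have hk : k ∈ d.keys := hmem k (List.mem_cons_self)
    set d' := if (d.getD k PySem.Dict.empty).contains s then d
      else d.insert k ((d.getD k PySem.Dict.empty).insert s 0) with hd'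
    have hkeys' : d'.keys = d.keys := by
      rw [hd']
      by_cases hc : (d.getD k PySem.Dict.empty).contains s
      · rw [if_pos hc]
      · rw [if_neg hc]
        exact PySem.Dict.keys_insert_of_contains d _ ((PySem.Dict.contains_iff_mem_keys d k).2 hk)
    have hget' : ∀ p, d'.getD p PySem.Dict.empty =
        if p = k then (d.getD k PySem.Dict.empty).setdefault s 0
        else d.getD p PySem.Dict.empty := by
      intro p
      rw [hd']
      by_cases hc : (d.getD k PySem.Dict.empty).contains s
      · rw [if_pos hc, PySem.Dict.setdefault_of_contains _ _ hc]
        split_ifs with h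
        · rw [h]
        · rfl
      · rw [if_neg hc, PySem.Dict.getD_insert,
          PySem.Dict.setdefault_of_not_contains _ _ (by simpa using hc)]
    obtain ⟨ihk, ihg⟩ := ih d' (hnd.of_cons) (fun p hp => by
      rw [hkeys']; exact hmem p (List.mem_cons_of_mem _ hp))
    refine ⟨?_, ?_⟩
    · simp only [List.foldl_cons, ← hd', ihk, hkeys']
    · intro p
      simp only [List.foldl_cons, ← hd', ihg p]
      have hknk : k ∉ K' := (List.nodup_cons.1 hnd).1
      by_cases hpK : p ∈ K'
      · have hpk : p ≠ k := fun h => hknk (h ▸ hpK)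
        rw [if_pos hpK, hget' p, if_neg hpk, if_pos (List.mem_cons_of_mem _ hpK)]
      · rw [if_neg hpK, hget' p]
        by_cases hpk : p = k
        · rw [if_pos hpk, if_pos (by rw [hpk]; exact List.mem_cons_self), hpk]
        · rw [if_neg hpk, if_neg (by simp [hpk, hpK])]

-- max(map(len, l), default=0)
theorem pv_foldl_opt (f : Option Int → Int → Option Int)
    (hf : ∀ m x, f (some m) x = some (max m x)) :
    ∀ (l : List Int) (m : Int),
    List.foldl f (some m) l = some (l.foldl (fun a b => max a b) m) := by
  intro l
  induction l with
  | nil => intro m; rfl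
  | cons x t ih =>
    intro m
    simp only [List.foldl_cons, hf]
    exact ih (max m x)

theorem pv_max_cast (t : List String) : ∀ (m : Nat),
    (t.map (fun s => PySem.Str.len s)).foldl (fun a b => max a b) ((m : Nat) : Int)
      = ((t.foldl (fun m s => max m s.toList.length) m : Nat) : Int) := by
  induction t with
  | nil => intro m; simp
  | cons a u ih =>
    intro m
    simp only [List.map_cons, List.foldl_cons]
    rw [PySem.Str.len_eq, show max ((m : Nat) : Int) ((a.toList.length : Nat) : Int)
        = ((max m a.toList.length : Nat) : Int) by omega, ih]

theorem pv_maxD (structures : List String) :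
    PySem.List.maxD (structures.map (fun s => (PySem.Str.len s : Int))) id 0
      = ((pvM structures : Nat) : Int) := by
  unfold PySem.List.maxD PySem.List.max?
  simp only [id_eq]
  match structures with
  | [] => rfl
  | s :: t =>
    simp only [List.map_cons, List.foldl_cons]
    refine Eq.trans (congrArg (fun o => Option.getD o 0)
      (pv_foldl_opt _ ?_ (t.map (fun s => PySem.Str.len s)) (PySem.Str.len s))) ?_
    · intro m x
      show (if m < x then some x else some m) = some (max m x)
      split_ifs with h
      · exact congrArg some (by omega)
      · exact congrArg some (by omega)
    simp only [Option.getD_some]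
    rw [PySem.Str.len_eq, pv_max_cast]
    have : pvM (s :: t) = t.foldl (fun m s => max m s.toList.length) s.toList.length := by
      simp [pvM]
    rw [this]

-- nested fold over per-element lists = fold over the flattened list
theorem pv_foldl_nested {α β γ : Type} (l : List γ) (h : γ → List β) (F : α → β → α) :
    ∀ a : α, l.foldl (fun a x => (h x).foldl F a) a = ((l.map h).flatten).foldl F a := by
  induction l with
  | nil => intro a; rfl
  | cons x t ih =>
    intro a
    simp only [List.foldl_cons, List.map_cons, List.flatten_cons, List.foldl_append]
    exact ih _

-- the one-insert form of A's tally loop (the two forms agree pointwise)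
theorem pv_bodyA :
    (fun (d : PySem.Dict Int (PySem.Dict String Int)) (ic : Int × Char) =>
      let pos : Int := ic.1 + 1
      let d := if d.contains pos then d else d.insert pos PySem.Dict.empty
      let inner := d.getD pos PySem.Dict.empty
      let inner := if inner.contains (pvChr ic.2) then inner else inner.insert (pvChr ic.2) 0
      d.insert pos (inner.insert (pvChr ic.2) (inner.getD (pvChr ic.2) 0 + 1)))
    = fun d ic => d.insert (ic.1 + 1) (pvG ic (d.getD (ic.1 + 1) PySem.Dict.empty)) :=
  funext fun d => funext fun ic => pv_stepA d ic

-- A's tally dictionary: its keys and its per-position entries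
theorem pv_d0_keys (strs : List String) :
    (List.foldl (fun d st => List.foldl
        (fun d ic => d.insert (ic.1 + 1) (pvG ic (d.getD (ic.1 + 1) PySem.Dict.empty))) d
        (PySem.List.enumerate st.toList 0)) PySem.Dict.empty strs).keys = pvPosL (pvM strs) := by
  rw [pv_foldl_nested strs (fun st => PySem.List.enumerate st.toList 0) _ PySem.Dict.empty,
      PySem.Dict.keys_foldl_insert_key _ (fun ic : Int × Char => ic.1 + 1),
      PySem.Dict.keys_empty, List.map_flatten, List.map_map]
  have hmaps : (List.map (fun ic : Int × Char => ic.1 + 1)) ∘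
        (fun st : String => PySem.List.enumerate st.toList 0)
      = fun st : String => pvPosL st.toList.length := by
    funext st
    rw [Function.comp_apply, pv_enum_map]
    simp [pvPosL]
  rw [hmaps]
  show List.foldl PySem.Set.add []
      ((strs.map (fun st => pvPosL st.toList.length)).flatten) = _
  rw [← pv_foldl_nested]
  exact pv_keys_fold strs 0

theorem pv_d0_getD (strs : List String) (j : Nat) :
    (List.foldl (fun d st => List.foldl
        (fun d ic => d.insert (ic.1 + 1) (pvG ic (d.getD (ic.1 + 1) PySem.Dict.empty))) d
        (PySem.List.enumerate st.toList 0)) PySem.Dict.empty strs).getD ((j : Int) + 1)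
        PySem.Dict.empty = pvCol strs j := by
  rw [pv_foldl_nested strs (fun st => PySem.List.enumerate st.toList 0) _ PySem.Dict.empty,
      pv_proj _ (fun ic : Int × Char => ic.1 + 1) pvG PySem.Dict.empty,
      PySem.Dict.getD_empty, List.filter_flatten, List.map_map]
  have hf : (List.filter (fun ic : Int × Char => ic.1 + 1 == (j : Int) + 1)) ∘
        (fun st : String => PySem.List.enumerate st.toList 0)
      = fun st : String =>
          if _h : j < st.toList.length then [((j : Int), st.toList[j])] else [] := by
    funext st
    rw [Function.comp_apply,
      List.filter_congr (fun (ic : Int × Char) _ =>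
        show (ic.1 + 1 == (j : Int) + 1) = (ic.1 + 1 == 0 + (j : Int) + 1) by rw [zero_add]),
      pv_enum_filter]
    simp
  rw [hf, ← pv_foldl_nested]
  have hbody : (fun (a : PySem.Dict String Int) (st : String) =>
        List.foldl (fun a ic => pvG ic a) a
          (if _h : j < st.toList.length then [((j : Int), st.toList[j])] else []))
      = fun d s => if j < s.toList.length then pvG ((j : Int), s.toList.getD j ' ') d else d := by
    funext a st
    by_cases h : j < st.toList.length
    · rw [dif_pos h, if_pos h, List.foldl_cons, List.foldl_nil, List.getD_eq_getElem _ _ h]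
    · rw [dif_neg h, if_neg h, List.foldl_nil]
  rw [hbody]
  rfl

theorem pv_A (dt : List (String × List String)) (strs : List String)
    (h : (PySem.Dict.mk dt).get? "structure" = some strs) :
    count_structure dt
      = (List.range (pvM strs)).map
          (fun j : Nat => (((j : Int) + 1), (pvFill (pvCol strs j)).items)) := by
  unfold count_structure
  rw [h, pv_bodyA]
  simp only [PySem.List.foldl_append_singleton, List.nil_append]
  set d0 := List.foldl (fun d st => List.foldl
      (fun d ic => d.insert (ic.1 + 1) (pvG ic (d.getD (ic.1 + 1) PySem.Dict.empty))) d
      (PySem.List.enumerate st.toList 0)) PySem.Dict.empty strs with hd0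
  simp only [List.foldl_cons, List.foldl_nil]
  have hK : d0.keys = pvPosL (pvM strs) := pv_d0_keys strs
  have hN : d0.keys.Nodup := by rw [hK]; exact pv_posL_nodup _
  obtain ⟨hk1, hg1⟩ := pv_pass "." d0.keys d0 hN (fun p hp => hp)
  set r1 := List.foldl (fun d pos =>
      if (d.getD pos PySem.Dict.empty).contains "." then d
      else d.insert pos ((d.getD pos PySem.Dict.empty).insert "." 0)) d0 d0.keys with hr1
  obtain ⟨hk2, hg2⟩ := pv_pass "(" r1.keys r1 (by rw [hk1]; exact hN) (fun p hp => hp)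
  set r2 := List.foldl (fun d pos =>
      if (d.getD pos PySem.Dict.empty).contains "(" then d
      else d.insert pos ((d.getD pos PySem.Dict.empty).insert "(" 0)) r1 r1.keys with hr2
  obtain ⟨hk3, hg3⟩ := pv_pass ")" r2.keys r2 (by rw [hk2, hk1]; exact hN) (fun p hp => hp)
  set r3 := List.foldl (fun d pos =>
      if (d.getD pos PySem.Dict.empty).contains ")" then d
      else d.insert pos ((d.getD pos PySem.Dict.empty).insert ")" 0)) r2 r2.keys with hr3
  have hkeys3 : r3.keys = pvPosL (pvM strs) := by rw [hk3, hk2, hk1, hK]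
  have hnd3 : r3.keys.Nodup := by rw [hkeys3]; exact pv_posL_nodup _
  rw [PySem.Dict.items_eq_map_keys r3 hnd3 PySem.Dict.empty, hkeys3, List.map_map,
    pvPosL, List.map_map]
  apply List.map_congr_left
  intro j hj
  have hjM : j < pvM strs := List.mem_range.1 hj
  have hmem : ((j : Int) + 1) ∈ pvPosL (pvM strs) := (pv_posL_mem _ _).2 (by omega)
  have e3 : r3.getD ((j : Int) + 1) PySem.Dict.empty
      = (r2.getD ((j : Int) + 1) PySem.Dict.empty).setdefault ")" 0 := by
    rw [hg3 _, if_pos (by rw [hk2, hk1, hK]; exact hmem)]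
  have e2 : r2.getD ((j : Int) + 1) PySem.Dict.empty
      = (r1.getD ((j : Int) + 1) PySem.Dict.empty).setdefault "(" 0 := by
    rw [hg2 _, if_pos (by rw [hk1, hK]; exact hmem)]
  have e1 : r1.getD ((j : Int) + 1) PySem.Dict.empty
      = (d0.getD ((j : Int) + 1) PySem.Dict.empty).setdefault "." 0 := by
    rw [hg1 _, if_pos (by rw [hK]; exact hmem)]
  simp only [Function.comp_apply, e3, e2, e1, hd0, pv_d0_getD strs j]
  rfl

-- ===== B-side lemmas =====

-- a guarded fold is a fold over the filtered-and-mapped list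
theorem pv_foldl_guard {α β γ : Type} (P : β → Prop) [DecidablePred P] (g : β → γ)
    (F : α → γ → α) : ∀ (l : List β) (a : α),
    l.foldl (fun a x => if P x then F a (g x) else a) a
      = ((l.filter (fun x => decide (P x))).map g).foldl F a := by
  intro l
  induction l with
  | nil => intro a; rfl
  | cons x t ih =>
    intro a
    by_cases h : P x
    · simp only [List.foldl_cons, List.filter_cons, h, if_true, decide_true, List.map_cons]
      exact ih _
    · simp only [List.foldl_cons, List.filter_cons, h, if_false, decide_false,
        Bool.false_eq_true]
      exact ih _

-- A's per-position tally dict IS the counter of the extracted column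
theorem pv_col_counter (strs : List String) (j : Nat) :
    pvCol strs j = PySem.Dict.counter (pvColList strs j) := by
  unfold pvCol pvColList
  exact (pv_foldl_guard (fun s : String => j < s.toList.length)
      (fun s : String => pvChr (s.toList.getD j ' '))
      (fun (d : PySem.Dict String Int) c => d.insert c (d.getD c 0 + 1)) strs
      PySem.Dict.empty).trans
    (PySem.Dict.foldl_insert_getD_add_one_eq_counter _)

-- setdefault step on a dict whose items are K paired with column counts
theorem pv_sd_step (d : PySem.Dict String Int) (col K : List String) (x : String)
    (hi : d.items = K.map (fun c => (c, (List.count c col : Int))))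
    (hcl : ∀ c ∈ col, c ∈ K) :
    (d.setdefault x 0).items
        = (PySem.Set.add K x).map (fun c => (c, (List.count c col : Int)))
      ∧ ∀ c ∈ col, c ∈ PySem.Set.add K x := by
  have hkeys : d.keys = K := by
    simp [PySem.Dict.keys, hi, Function.comp_def]
  by_cases hx : x ∈ K
  · have hc : d.contains x = true := by
      rw [PySem.Dict.contains_eq_decide_mem_keys, hkeys]; simpa using hx
    have hadd : PySem.Set.add K x = K := by
      rw [PySem.Set.add, if_pos (by simpa [PySem.Set.contains, List.contains_eq_mem] using hx)]
    rw [PySem.Dict.setdefault_of_contains _ _ hc, hadd]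
    exact ⟨hi, hcl⟩
  · have hc : d.contains x = false := by
      rw [PySem.Dict.contains_eq_decide_mem_keys, hkeys]; simpa using hx
    have hadd : PySem.Set.add K x = K ++ [x] := by
      rw [PySem.Set.add,
        if_neg (by simp [PySem.Set.contains, List.contains_eq_mem, hx])]
    have hcnt : List.count x col = 0 :=
      List.count_eq_zero.2 (fun hmem => hx (hcl x hmem))
    rw [PySem.Dict.setdefault_of_not_contains _ _ hc,
      PySem.Dict.items_insert_of_not_contains _ _ hc, hi, hadd, List.map_append]
    constructor
    · simp [hcnt]
    · intro c hcm
      exact List.mem_append_left _ (hcl c hcm)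

-- the filled per-position dict, as B computes it: ordered dedup paired with counts
theorem pv_fill_items (strs : List String) (j : Nat) :
    (pvFill (pvCol strs j)).items
      = (PySem.List.dedup (pvColList strs j ++ [".", "(", ")"])).map
          (fun c => (c, (List.count c (pvColList strs j) : Int))) := by
  set col := pvColList strs j with hcol
  have hded : PySem.List.dedup (col ++ [".", "(", ")"])
      = PySem.Set.add (PySem.Set.add (PySem.Set.add (PySem.Set.ofList col) ".") "(") ")" := by
    simp [PySem.List.dedup, PySem.Set.ofList, List.foldl_append, PySem.Set.empty]
  rw [pv_col_counter, hded]
  have h0 : (PySem.Dict.counter col).items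
      = (PySem.Set.ofList col).map (fun c => (c, (List.count c col : Int))) :=
    PySem.Dict.items_counter col
  have hm0 : ∀ c ∈ col, c ∈ PySem.Set.ofList col := fun c hc =>
    (PySem.Set.mem_ofList col c).2 hc
  obtain ⟨h1, hm1⟩ := pv_sd_step (PySem.Dict.counter col) col (PySem.Set.ofList col) "." h0 hm0
  obtain ⟨h2, hm2⟩ := pv_sd_step _ col _ "(" h1 hm1
  obtain ⟨h3, _⟩ := pv_sd_step _ col _ ")" h2 hm2
  exact h3

theorem pv_B (dt : List (String × List String)) (strs : List String)
    (h : (PySem.Dict.mk dt).get? "structure" = some strs) :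
    count_structure_alt dt
      = (List.range (pvM strs)).map
          (fun j : Nat => (((j : Int) + 1), (pvFill (pvCol strs j)).items)) := by
  unfold count_structure_alt
  rw [h]
  simp only [pv_maxD, PySem.List.pyRange_zero_natCast]
  rw [List.foldl_map]
  have hcol : ∀ j : Nat,
      (strs.filter (fun s => ((j : Nat) : Int) < (PySem.Str.len s : Int))).map
          (fun s => pvChr (PySem.List.pyGetD s.toList ((j : Nat) : Int) ' '))
        = pvColList strs j := by
    intro j
    unfold pvColList
    simp only [PySem.List.pyGetD_natCast, PySem.Str.len_eq]
    congr 1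
    apply List.filter_congr
    intro s _
    simp [Nat.cast_lt]
  have hF : (fun (x : PySem.Dict Int (PySem.Dict String Int)) (y : Nat) =>
        x.insert ((y : Int) + 1)
          (PySem.Dict.mk
            ((PySem.List.dedup
                ((strs.filter (fun s => decide ((y : Int) < (PySem.Str.len s : Int)))).map
                    (fun s => pvChr (PySem.List.pyGetD s.toList ((y : Nat) : Int) ' ')) ++
                  [".", "(", ")"])).map
              (fun c =>
                (c, (PySem.List.count
                      ((strs.filter (fun s => decide ((y : Int) < (PySem.Str.len s : Int)))).map
                        (fun s => pvChr (PySem.List.pyGetD s.toList ((y : Nat) : Int) ' '))) c : Int))))))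
      = fun x y => x.insert ((y : Int) + 1) (PySem.Dict.mk ((pvFill (pvCol strs y)).items)) := by
    funext x y
    rw [hcol y, pv_fill_items]
    simp [PySem.List.count_eq]
  rw [hF]
  rw [PySem.Dict.items_foldl_insert_fresh (List.range (pvM strs))
      (fun k : Nat => (k : Int) + 1)
      (fun k : Nat => PySem.Dict.mk ((pvFill (pvCol strs k)).items)) PySem.Dict.empty
      (fun a _ => PySem.Dict.contains_empty _) (pv_posL_nodup (pvM strs))]
  show List.map (fun p : Int × PySem.Dict String Int => (p.1, p.2.items))
      ([] ++ List.map (fun a : Nat => ((a : Int) + 1, PySem.Dict.mk ((pvFill (pvCol strs a)).items)))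
        (List.range (pvM strs))) = _
  rw [List.nil_append, List.map_map]
  rfl

-- ===== VERDICT (by name: the statement is the Claim_ definition above) =====
theorem count_structure_spec : Claim_equal_count_structure := by
  intro dt _hdom hpre
  unfold Spec_count_structure
  cases hh : (PySem.Dict.mk dt).get? "structure" with
  | none =>
    exfalso
    have : "structure" ∉ (PySem.Dict.mk dt).keys :=
      (PySem.Dict.get?_eq_none_iff_not_mem_keys _ _).1 hh
    rw [PySem.Dict.keys_mk] at this
    exact this hpre
  | some strs => rw [pv_A dt strs hh, pv_B dt strs hh]
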